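-- pv_equiv track=rewrite | github.com/hgim96715-lgtm/python_coding_test | 프로그래머스/0/120869. 외계어 사전/외계어 사전.py | solution
-- ===== SOURCE A (Python) =====
-- def solution(spell, dic):
--     s=sorted(spell)
--     for d in dic:
--         c=sorted(d)
--         if c==s:
--             return 1
--             break
--     else:
--         return 2
-- ===== SOURCE B (Python) =====
-- def _counts(it):
--     c = {}
--     for x in it:
--         c[x] = c.get(x, 0) + 1
--     return c
--
-- def solution(spell, dic):
--     cs = _counts(spell)
--     for d in dic:
--         if _counts(d) == cs:
--             return 1
--     return 2
-- ===== Notes on version B (the rewrite author's own statement) =====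
-- stated objective: alternative
-- what changed: Anagram test canonicalized by frequency counting: the target multiset of spell is built once as a hash-map counter and each dictionary word is compared by its own counter, instead of sorting spell and re-sorting every word.
import Mathlib
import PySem

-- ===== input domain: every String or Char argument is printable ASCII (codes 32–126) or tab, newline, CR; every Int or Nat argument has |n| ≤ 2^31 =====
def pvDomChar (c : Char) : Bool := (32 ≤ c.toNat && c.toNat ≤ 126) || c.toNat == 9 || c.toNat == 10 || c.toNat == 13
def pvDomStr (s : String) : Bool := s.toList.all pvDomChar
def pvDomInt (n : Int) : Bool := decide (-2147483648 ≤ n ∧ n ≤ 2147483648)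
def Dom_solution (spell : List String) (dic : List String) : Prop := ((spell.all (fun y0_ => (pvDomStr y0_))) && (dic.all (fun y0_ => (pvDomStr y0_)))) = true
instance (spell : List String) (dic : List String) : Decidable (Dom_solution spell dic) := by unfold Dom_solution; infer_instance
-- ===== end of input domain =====

-- B replaces per-word sorting by frequency counting with a dict built once for spell (alternative canonicalization, same 1/2 results).


-- ===== PORT A =====
-- sorted(d) on a string d = the sorted list of its one-character strings
def pyChars (d : String) : List String := d.toList.map (fun ch => String.ofList [ch])

-- the for/else loop: return 1 on the first word whose sorted character list equals s, else 2
def solutionLoop (s : List String) : List String → Int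
  | [] => 2
  | d :: rest =>
    let c := PySem.List.sorted (pyChars d) (fun x => x) false
    if c = s then 1 else solutionLoop s rest

def solution (spell : List String) (dic : List String) : Int :=
  solutionLoop (PySem.List.sorted spell (fun x => x) false) dic

-- ===== PORT B =====
-- _counts: plain-dict counting loop  c[x] = c.get(x, 0) + 1
def countsB (xs : List String) : PySem.Dict String Int :=
  xs.foldl (fun c x => c.insert x (c.getD x 0 + 1)) PySem.Dict.empty

-- Python dict ==: order-insensitive comparison of key/value mappings
def dictEqB (d1 d2 : PySem.Dict String Int) : Bool :=
  d1.items.all (fun kv => d2.get? kv.1 == some kv.2) &&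
  d2.items.all (fun kv => d1.get? kv.1 == some kv.2)

def solutionAltLoop (cs : PySem.Dict String Int) : List String → Int
  | [] => 2
  | d :: rest =>
    if dictEqB (countsB (pyChars d)) cs then 1 else solutionAltLoop cs rest

def solution_alt (spell : List String) (dic : List String) : Int :=
  solutionAltLoop (countsB spell) dic

-- ===== PRECONDITION & SPEC =====
def Spec_solution (spell : List String) (dic : List String) (out : Int) : Prop := out = solution_alt spell dic
instance (spell : List String) (dic : List String) (out : Int) : Decidable (Spec_solution spell dic out) := by unfold Spec_solution; infer_instance

-- ===== CLAIM (what is proved, stated in full; the proofs are below) =====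
def Claim_equal_solution : Prop := ∀ (spell : List String) (dic : List String), Dom_solution spell dic → Spec_solution spell dic (solution spell dic)

-- ===== LEMMAS AND PROOFS =====

lemma countsB_eq_counter (xs : List String) : countsB xs = PySem.Dict.counter xs :=
  PySem.Dict.foldl_insert_getD_add_one_eq_counter xs

lemma get?_counter (xs : List String) (v : String) :
    (PySem.Dict.counter xs).get? v = if v ∈ xs then some ((xs.count v : Int)) else none := by
  by_cases h : v ∈ xs
  · have hmem : (v, ((xs.count v : Int))) ∈ (PySem.Dict.counter xs).items := by
      rw [PySem.Dict.items_counter]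
      exact List.mem_map.mpr ⟨v, (PySem.Set.mem_ofList _ _).mpr h, rfl⟩
    simp [h, PySem.Dict.get?_of_mem_items _ hmem (PySem.Dict.nodup_keys_counter xs)]
  · have : (PySem.Dict.counter xs).get? v = none := by
      rw [PySem.Dict.get?_eq_none_iff_not_mem_keys, PySem.Dict.keys_counter]
      simpa [PySem.Set.mem_ofList] using h
    simp [h, this]

lemma dictEqB_iff_perm (l1 l2 : List String) :
    dictEqB (countsB l1) (countsB l2) = true ↔ l1.Perm l2 := by
  simp only [dictEqB, countsB_eq_counter, Bool.and_eq_true, List.all_eq_true,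
    PySem.Dict.items_counter, List.mem_map, beq_iff_eq]
  constructor
  · rintro ⟨h1, h2⟩
    refine List.perm_iff_count.mpr (fun v => ?_)
    by_cases hv1 : v ∈ l1
    · have := h1 _ ⟨v, (PySem.Set.mem_ofList _ _).mpr hv1, rfl⟩
      rw [get?_counter] at this
      by_cases hv2 : v ∈ l2
      · simp [hv2] at this; exact_mod_cast this.symm
      · simp [hv2] at this
    · by_cases hv2 : v ∈ l2
      · have := h2 _ ⟨v, (PySem.Set.mem_ofList _ _).mpr hv2, rfl⟩
        rw [get?_counter] at this
        simp [hv1] at this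
      · simp [List.count_eq_zero_of_not_mem hv1, List.count_eq_zero_of_not_mem hv2]
  · intro hp
    have hc := fun v => List.perm_iff_count.mp hp v
    constructor
    · rintro kv ⟨v, hv, rfl⟩
      have hv1 : v ∈ l1 := (PySem.Set.mem_ofList _ _).mp hv
      have hv2 : v ∈ l2 := hp.mem_iff.mp hv1
      simp [get?_counter, hv2, hc v]
    · rintro kv ⟨v, hv, rfl⟩
      have hv2 : v ∈ l2 := (PySem.Set.mem_ofList _ _).mp hv
      have hv1 : v ∈ l1 := hp.mem_iff.mpr hv2
      simp [get?_counter, hv1, hc v]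

lemma loop_eq (spell : List String) (dic : List String) :
    solutionLoop (PySem.List.sorted spell (fun x => x) false) dic
      = solutionAltLoop (countsB spell) dic := by
  induction dic with
  | nil => rfl
  | cons d rest ih =>
    simp only [solutionLoop, solutionAltLoop]
    have hA : (PySem.List.sorted (pyChars d) (fun x => x) false
        = PySem.List.sorted spell (fun x => x) false) ↔ (pyChars d).Perm spell :=
      PySem.List.sorted_id_eq_sorted_id_iff_perm _ _
    have hB := dictEqB_iff_perm (pyChars d) spell
    by_cases hp : (pyChars d).Perm spell
    · simp [hA.mpr hp, hB.mpr hp]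
    · have ha : ¬ (PySem.List.sorted (pyChars d) (fun x => x) false
        = PySem.List.sorted spell (fun x => x) false) := fun h => hp (hA.mp h)
      have hb : dictEqB (countsB (pyChars d)) (countsB spell) = false := by
        cases hbb : dictEqB (countsB (pyChars d)) (countsB spell)
        · rfl
        · exact absurd (hB.mp hbb) hp
      simp [ha, hb, ih]

-- ===== VERDICT (by name: the statement is the Claim_ definition above) =====
theorem solution_spec : Claim_equal_solution := by
  intro spell dic _
  unfold Spec_solution solution solution_alt
  exact loop_eq spell dic
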